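-- pv_equiv track=rewrite | github.com/Idontwan/SISG4HEI_Alpha | Human_Path_Generation/Dest_nodes.py | calc_key_centers
-- ===== SOURCE A (Python) =====
-- def calc_key_centers(rooms, furnitures):
--     # calculate bedroom center, kitchen center, Desk center, Table center, TV center
--     Bed_c, Kit_c, Des_c, Tab_c, TV_c = None, None, None, None, None
--     for i in range(len(rooms)):
--         rx, ry, rL, rW, rn = rooms[i]
--         if rn == 'Bedroom':
--             Bed_c = [rx+rL//2, ry+rW//2]
--         elif rn == 'Kitchen':
--             Kit_c = [rx+rL//2, ry+rW//2]
--         for fur in furnitures[i]: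
--             fx, fy, fL, fW, fn = fur
--             if fn == 'Desk':
--                 Des_c = [fx+fL//2, fy+fW//2]
--             elif fn == 'Dinner_Table':
--                 Tab_c = [fx+fL//2, fy+fW//2]
--             elif fn == 'TV':
--                 TV_c = [fx+fL//2, fy+fW//2]
--     return Bed_c, Kit_c, Des_c, Tab_c, TV_c
-- ===== SOURCE B (Python) =====
-- def calc_key_centers(rooms, furnitures):
--     # Collect every center as a (name, center) event in one pass, then answer
--     # each query by a reverse search for the last matching name.
--     room_cs = []
--     fur_cs = []
--     for i in range(len(rooms)):
--         x, y, L, W, n = rooms[i]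
--         room_cs.append((n, [x + L // 2, y + W // 2]))
--         for x, y, L, W, n in furnitures[i]:
--             fur_cs.append((n, [x + L // 2, y + W // 2]))
--
--     def last(pairs, name):
--         for n, c in reversed(pairs):
--             if n == name:
--                 return c
--         return None
--
--     return (last(room_cs, 'Bedroom'), last(room_cs, 'Kitchen'),
--             last(fur_cs, 'Desk'), last(fur_cs, 'Dinner_Table'), last(fur_cs, 'TV'))
-- ===== Notes on version B (the rewrite author's own statement) =====
-- stated objective: alternative
-- what changed: Instead of A's five variables overwritten by an if/elif chain during the loop, B records every room center and every furniture center as (name, center) events in two lists, then answers each of the five queries by a reverse scan for the last matching name.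
import Mathlib
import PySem

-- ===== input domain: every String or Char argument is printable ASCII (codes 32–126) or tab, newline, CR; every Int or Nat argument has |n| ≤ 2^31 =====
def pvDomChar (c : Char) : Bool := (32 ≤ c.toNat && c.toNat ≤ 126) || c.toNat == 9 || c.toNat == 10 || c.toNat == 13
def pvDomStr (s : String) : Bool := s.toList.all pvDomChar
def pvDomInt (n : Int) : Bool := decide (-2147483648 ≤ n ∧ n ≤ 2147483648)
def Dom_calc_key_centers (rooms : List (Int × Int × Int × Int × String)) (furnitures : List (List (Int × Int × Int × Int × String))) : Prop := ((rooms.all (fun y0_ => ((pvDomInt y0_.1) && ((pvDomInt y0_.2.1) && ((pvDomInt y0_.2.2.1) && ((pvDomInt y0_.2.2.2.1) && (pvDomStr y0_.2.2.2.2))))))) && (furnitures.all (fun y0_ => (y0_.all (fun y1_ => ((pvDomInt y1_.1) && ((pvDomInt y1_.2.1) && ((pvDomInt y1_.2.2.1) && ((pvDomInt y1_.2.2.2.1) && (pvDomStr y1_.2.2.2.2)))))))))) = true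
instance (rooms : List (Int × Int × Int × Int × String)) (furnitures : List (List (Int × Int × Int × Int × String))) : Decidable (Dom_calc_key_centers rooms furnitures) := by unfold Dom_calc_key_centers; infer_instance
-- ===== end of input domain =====

-- B records every room/furniture center as (name, center) events and answers the five
-- queries by a reverse search for the last matching name (objective: alternative).

abbrev pvSt := Option (List Int) × Option (List Int) × Option (List Int) × Option (List Int) × Option (List Int)

-- ===== PORT A =====
-- A's if/elif chain for one room tuple, updating Bed_c / Kit_c
def pvRoomA (st : pvSt) (r : Int × Int × Int × Int × String) : pvSt :=
  match st, r with
  | (b, k, de, t, tv), (rx, ry, rL, rW, rn) =>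
    if rn = "Bedroom" then
      (some [rx + PySem.Int.floordiv rL 2, ry + PySem.Int.floordiv rW 2], k, de, t, tv)
    else if rn = "Kitchen" then
      (b, some [rx + PySem.Int.floordiv rL 2, ry + PySem.Int.floordiv rW 2], de, t, tv)
    else (b, k, de, t, tv)

-- A's if/elif chain for one furniture tuple, updating Des_c / Tab_c / TV_c
def pvFurA (st : pvSt) (f : Int × Int × Int × Int × String) : pvSt :=
  match st, f with
  | (b, k, de, t, tv), (fx, fy, fL, fW, fn) =>
    if fn = "Desk" then
      (b, k, some [fx + PySem.Int.floordiv fL 2, fy + PySem.Int.floordiv fW 2], t, tv)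
    else if fn = "Dinner_Table" then
      (b, k, de, some [fx + PySem.Int.floordiv fL 2, fy + PySem.Int.floordiv fW 2], tv)
    else if fn = "TV" then
      (b, k, de, t, some [fx + PySem.Int.floordiv fL 2, fy + PySem.Int.floordiv fW 2])
    else (b, k, de, t, tv)

-- for i in range(len(rooms)): room = rooms[i]; for fur in furnitures[i]: …
-- (pyGetD defaults are only reached outside Pre_, where Python raises IndexError)
def calc_key_centers (rooms : List (Int × Int × Int × Int × String)) (furnitures : List (List (Int × Int × Int × Int × String))) : pvSt :=
  (PySem.List.pyRange 0 (PySem.List.len rooms)).foldl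
    (fun st i =>
      (PySem.List.pyGetD furnitures i []).foldl pvFurA
        (pvRoomA st (PySem.List.pyGetD rooms i (0, 0, 0, 0, ""))))
    (none, none, none, none, none)

-- ===== PORT B =====
-- (name, [x + L//2, y + W//2]) event for one tuple
def pvCenter (r : Int × Int × Int × Int × String) : String × List Int :=
  (r.2.2.2.2, [r.1 + PySem.Int.floordiv r.2.2.1 2, r.2.1 + PySem.Int.floordiv r.2.2.2.1 2])

-- 'for n, c in reversed(pairs): if n == name: return c' after reversing
def pvLastGo : List (String × List Int) → String → Option (List Int)
  | [], _ => none
  | (n, c) :: rest, name => if n = name then some c else pvLastGo rest name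

def pvLast (pairs : List (String × List Int)) (name : String) : Option (List Int) :=
  pvLastGo pairs.reverse name

def calc_key_centers_alt (rooms : List (Int × Int × Int × Int × String)) (furnitures : List (List (Int × Int × Int × Int × String))) : pvSt :=
  let acc := (PySem.List.pyRange 0 (PySem.List.len rooms)).foldl
    (fun (acc : List (String × List Int) × List (String × List Int)) i =>
      (acc.1 ++ [pvCenter (PySem.List.pyGetD rooms i (0, 0, 0, 0, ""))],
       (PySem.List.pyGetD furnitures i []).foldl (fun fc f => fc ++ [pvCenter f]) acc.2))
    ([], [])
  (pvLast acc.1 "Bedroom", pvLast acc.1 "Kitchen",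
   pvLast acc.2 "Desk", pvLast acc.2 "Dinner_Table", pvLast acc.2 "TV")

-- ===== PRECONDITION & SPEC =====
-- A (and B) raise IndexError at furnitures[i] when furnitures is shorter than rooms; those inputs are excluded.
def Pre_calc_key_centers (rooms : List (Int × Int × Int × Int × String)) (furnitures : List (List (Int × Int × Int × Int × String))) : Prop :=
  rooms.length ≤ furnitures.length
instance (rooms : List (Int × Int × Int × Int × String)) (furnitures : List (List (Int × Int × Int × Int × String))) : Decidable (Pre_calc_key_centers rooms furnitures) := by unfold Pre_calc_key_centers; infer_instance

def pvWitness_calc_key_centers : (List (Int × Int × Int × Int × String)) × (List (List (Int × Int × Int × Int × String))) :=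
  ([(0, 0, 4, 4, "Bedroom"), (4, 0, 3, 3, "Kitchen")], [[(1, 1, 2, 1, "Desk")], [(5, 1, 1, 1, "TV")]])

def Spec_calc_key_centers (rooms : List (Int × Int × Int × Int × String)) (furnitures : List (List (Int × Int × Int × Int × String))) (out : Option (List Int) × Option (List Int) × Option (List Int) × Option (List Int) × Option (List Int)) : Prop := out = calc_key_centers_alt rooms furnitures
instance (rooms : List (Int × Int × Int × Int × String)) (furnitures : List (List (Int × Int × Int × Int × String))) (out : Option (List Int) × Option (List Int) × Option (List Int) × Option (List Int) × Option (List Int)) : Decidable (Spec_calc_key_centers rooms furnitures out) := by unfold Spec_calc_key_centers; infer_instance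

-- ===== CLAIM =====
def Claim_equal_calc_key_centers : Prop := ∀ (rooms : List (Int × Int × Int × Int × String)) (furnitures : List (List (Int × Int × Int × Int × String))), Dom_calc_key_centers rooms furnitures → Pre_calc_key_centers rooms furnitures → Spec_calc_key_centers rooms furnitures (calc_key_centers rooms furnitures)

-- ===== LEMMAS AND PROOFS =====

-- 'first some wins' combinator used to state the loop invariants
def pvOr (x y : Option (List Int)) : Option (List Int) :=
  match x with
  | some a => some a
  | none => y

@[simp] lemma pvOr_some (a : List Int) (y : Option (List Int)) : pvOr (some a) y = some a := rfl
@[simp] lemma pvOr_none (y : Option (List Int)) : pvOr none y = y := rfl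
@[simp] lemma pvOr_assoc (x y z : Option (List Int)) : pvOr (pvOr x y) z = pvOr x (pvOr y z) := by
  cases x <;> rfl
@[simp] lemma pvOr_none_right (x : Option (List Int)) : pvOr x none = x := by cases x <;> rfl

@[simp] lemma pvLast_nil (n : String) : pvLast [] n = none := rfl

@[simp] lemma pvLastGo_append (u v : List (String × List Int)) (n : String) :
    pvLastGo (u ++ v) n = pvOr (pvLastGo u n) (pvLastGo v n) := by
  induction u with
  | nil => simp [pvLastGo]
  | cons e u ih =>
    obtain ⟨en, ec⟩ := e
    by_cases h : en = n <;> simp [pvLastGo, h, ih]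

@[simp] lemma pvLast_append (u v : List (String × List Int)) (n : String) :
    pvLast (u ++ v) n = pvOr (pvLast v n) (pvLast u n) := by
  simp [pvLast]

@[simp] lemma pvLast_single (m : String) (c : List Int) (n : String) :
    pvLast [(m, c)] n = if m = n then some c else none := by
  simp [pvLast, pvLastGo]

@[simp] lemma pvLast_cons (m : String) (c : List Int) (rest : List (String × List Int)) (n : String) :
    pvLast ((m, c) :: rest) n = pvOr (pvLast rest n) (if m = n then some c else none) := by
  simp [pvLast, pvLastGo]

-- The index-driven loop, read through rooms[i] / furnitures[i], is the fold over the zipped lists.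
lemma pv_idx_zip {σ : Type} (g : σ → (Int × Int × Int × Int × String) → List (Int × Int × Int × Int × String) → σ)
    (rs : List (Int × Int × Int × Int × String)) (fs : List (List (Int × Int × Int × Int × String)))
    (h : rs.length ≤ fs.length) :
    ∀ (n k : Nat), k + n = rs.length → ∀ (init : σ),
      (PySem.List.pyRange (k : Int) (rs.length : Int)).foldl
          (fun st i => g st (PySem.List.pyGetD rs i (0, 0, 0, 0, "")) (PySem.List.pyGetD fs i [])) init
        = ((rs.drop k).zip (fs.drop k)).foldl (fun st p => g st p.1 p.2) init := by
  intro n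
  induction n with
  | zero =>
    intro k hk init
    have h1 : rs.drop k = [] := by
      apply List.drop_eq_nil_of_le; omega
    have h2 : PySem.List.pyRange (k : Int) (rs.length : Int) = [] := by
      simp [PySem.List.pyRange]; omega
    simp [h1, h2]
  | succ n ih =>
    intro k hk init
    have hkr : k < rs.length := by omega
    have hkf : k < fs.length := by omega
    have hlt : (k : Int) < (rs.length : Int) := by exact_mod_cast hkr
    rw [PySem.List.pyRange_one_cons hlt]
    have e1 : PySem.List.pyGetD rs (k : Int) (0, 0, 0, 0, "") = rs[k] := by
      rw [PySem.List.pyGetD_natCast]; exact List.getD_eq_getElem rs _ hkr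
    have e2 : PySem.List.pyGetD fs (k : Int) [] = fs[k] := by
      rw [PySem.List.pyGetD_natCast]; exact List.getD_eq_getElem fs _ hkf
    have e3 : ((k : Int) + 1) = ((k + 1 : Nat) : Int) := by push_cast; ring
    rw [List.foldl_cons, e1, e2, e3, ih (k + 1) (by omega),
        List.drop_eq_getElem_cons hkr, List.drop_eq_getElem_cons hkf,
        List.zip_cons_cons, List.foldl_cons]

-- fur fold of A: first two components untouched, rest = last matching event over fs
lemma pvFur_fold (fs : List (Int × Int × Int × Int × String)) :
    ∀ (st : pvSt), fs.foldl pvFurA st =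
      (st.1, st.2.1,
       pvOr (pvLast (fs.map pvCenter) "Desk") st.2.2.1,
       pvOr (pvLast (fs.map pvCenter) "Dinner_Table") st.2.2.2.1,
       pvOr (pvLast (fs.map pvCenter) "TV") st.2.2.2.2) := by
  induction fs with
  | nil => intro st; simp
  | cons f fs ih =>
    intro st
    obtain ⟨b, k, de, t, tv⟩ := st
    obtain ⟨fx, fy, fL, fW, fn⟩ := f
    have hsplit : ((fx, fy, fL, fW, fn) :: fs).map pvCenter
        = [pvCenter (fx, fy, fL, fW, fn)] ++ fs.map pvCenter := by simp
    rw [List.foldl_cons, ih, hsplit]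
    by_cases h1 : fn = "Desk"
    · subst h1; simp [pvFurA, pvCenter]
    · by_cases h2 : fn = "Dinner_Table"
      · subst h2; simp [pvFurA, pvCenter, h1]
      · by_cases h3 : fn = "TV"
        · subst h3; simp [pvFurA, pvCenter, h1, h2]
        · simp [pvFurA, pvCenter, h1, h2, h3]

-- the whole zipped loop of A, characterised by the two event streams
lemma pvA_fold (l : List ((Int × Int × Int × Int × String) × List (Int × Int × Int × Int × String))) :
    ∀ (st : pvSt),
      l.foldl (fun st p => p.2.foldl pvFurA (pvRoomA st p.1)) st =
        (pvOr (pvLast (l.map (fun p => pvCenter p.1)) "Bedroom") st.1,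
         pvOr (pvLast (l.map (fun p => pvCenter p.1)) "Kitchen") st.2.1,
         pvOr (pvLast (l.flatMap (fun p => p.2.map pvCenter)) "Desk") st.2.2.1,
         pvOr (pvLast (l.flatMap (fun p => p.2.map pvCenter)) "Dinner_Table") st.2.2.2.1,
         pvOr (pvLast (l.flatMap (fun p => p.2.map pvCenter)) "TV") st.2.2.2.2) := by
  induction l with
  | nil => intro st; simp
  | cons p l ih =>
    intro st
    obtain ⟨b, k, de, t, tv⟩ := st
    obtain ⟨⟨rx, ry, rL, rW, rn⟩, furs⟩ := p
    have hr : (((rx, ry, rL, rW, rn), furs) :: l).map (fun p => pvCenter p.1)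
        = [pvCenter (rx, ry, rL, rW, rn)] ++ l.map (fun p => pvCenter p.1) := by simp
    have hf : (((rx, ry, rL, rW, rn), furs) :: l).flatMap (fun p => p.2.map pvCenter)
        = furs.map pvCenter ++ l.flatMap (fun p => p.2.map pvCenter) := by simp
    rw [List.foldl_cons, pvFur_fold, ih, hr, hf]
    by_cases h1 : rn = "Bedroom"
    · subst h1; simp [pvRoomA, pvCenter]
    · by_cases h2 : rn = "Kitchen"
      · subst h2; simp [pvRoomA, pvCenter, h1]
      · simp [pvRoomA, pvCenter, h1, h2]

-- one furniture list appended event by event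
lemma pvB_inner (fs : List (Int × Int × Int × Int × String)) :
    ∀ (acc : List (String × List Int)),
      fs.foldl (fun fc f => fc ++ [pvCenter f]) acc = acc ++ fs.map pvCenter := by
  induction fs with
  | nil => intro acc; simp
  | cons f fs ih => intro acc; simp [ih]

-- the zipped loop of B accumulates exactly those two event streams
lemma pvB_fold (l : List ((Int × Int × Int × Int × String) × List (Int × Int × Int × Int × String))) :
    ∀ (acc : List (String × List Int) × List (String × List Int)),
      l.foldl (fun acc p =>
        (acc.1 ++ [pvCenter p.1], p.2.foldl (fun fc f => fc ++ [pvCenter f]) acc.2)) acc =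
        (acc.1 ++ l.map (fun p => pvCenter p.1),
         acc.2 ++ l.flatMap (fun p => p.2.map pvCenter)) := by
  induction l with
  | nil => intro acc; simp
  | cons p l ih =>
    intro acc
    rw [List.foldl_cons, ih, pvB_inner]
    simp

-- ===== VERDICT =====
theorem calc_key_centers_spec : Claim_equal_calc_key_centers := by
  intro rooms furnitures _ hpre
  unfold Spec_calc_key_centers calc_key_centers calc_key_centers_alt
  simp only [PySem.List.len_eq]
  have hA := pv_idx_zip (fun st r furs => furs.foldl pvFurA (pvRoomA st r)) rooms furnitures hpre
      rooms.length 0 (by omega) (none, none, none, none, none)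
  have hB := pv_idx_zip (fun (acc : List (String × List Int) × List (String × List Int)) r furs =>
      (acc.1 ++ [pvCenter r], furs.foldl (fun fc f => fc ++ [pvCenter f]) acc.2)) rooms furnitures hpre
      rooms.length 0 (by omega) ([], [])
  simp only [Nat.cast_zero, List.drop_zero] at hA hB
  rw [hA, pvA_fold]
  rw [hB, pvB_fold]
  simp
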